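-- pv_equiv track=rewrite | github.com/Cylin0201/Algorithm_23_2 | HW01~06/HW06/hw06.py | dna_alignment
-- ===== SOURCE A (Python) =====
-- def dna_alignment(a, b):
--     m = len(a)
--     n = len(b)
--
--     table = [[0] * (n + 1) for _ in range(m + 1)]
--     min_index = [[(0, 0)] * (n + 1) for _ in range(m + 1)]
--
--     for i in range(m, -1, -1):
--         table[i][n] = (m - i) * 2
--
--     for j in range(n, -1, -1):
--         table[m][j] = (n - j) * 2
--
--     for i in range(m - 1, -1, -1):
--         for j in range(n - 1, -1, -1):
--             penalty = 1 if a[i] != b[j] else 0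
--             options = [
--                 (table[i + 1][j + 1] + penalty, (i + 1, j + 1)),
--                 (table[i + 1][j] + 2, (i + 1, j)),
--                 (table[i][j + 1] + 2, (i, j + 1))
--             ]
--             table[i][j], min_index[i][j] = min(options)
--
--     return table
-- ===== SOURCE B (Python) =====
-- def dna_alignment(a, b):
--     m, n = len(a), len(b)
--     # diags[s] holds the anti-diagonal i + j == s of the suffix-alignment cost
--     # matrix, listed by increasing i (rows max(0, s - n) .. min(m, s)).
--     diags = [None] * (m + n + 1)
--     diags[m + n] = [0]
--     for s in range(m + n - 1, -1, -1):
--         lo, hi = max(0, s - n), min(m, s)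
--         cur = []
--         for i in range(lo, hi + 1):
--             j = s - i
--             if i == m:
--                 cur.append(2 * (n - j))
--             elif j == n:
--                 cur.append(2 * (m - i))
--             else:
--                 nxt = diags[s + 1]
--                 lo1 = max(0, s + 1 - n)
--                 lo2 = max(0, s + 2 - n)
--                 diag = diags[s + 2][i + 1 - lo2] + (a[i] != b[j])
--                 down = nxt[i + 1 - lo1] + 2
--                 right = nxt[i - lo1] + 2
--                 cur.append(min(min(diag, down), right))
--         diags[s] = cur
--     return [[diags[i + j][i - max(0, i + j - n)] for j in range(n + 1)]
--             for i in range(m + 1)]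
-- ===== Notes on version B (the rewrite author's own statement) =====
-- stated objective: alternative
-- what changed: Replaces A's row-by-row in-place fill of a 2D table (with tuple-min and an unused min_index table) by an anti-diagonal wavefront: each anti-diagonal of the cost matrix is built as a fresh list from the two previous diagonals, and the returned table is assembled from the diagonals at the end.
import Mathlib
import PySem

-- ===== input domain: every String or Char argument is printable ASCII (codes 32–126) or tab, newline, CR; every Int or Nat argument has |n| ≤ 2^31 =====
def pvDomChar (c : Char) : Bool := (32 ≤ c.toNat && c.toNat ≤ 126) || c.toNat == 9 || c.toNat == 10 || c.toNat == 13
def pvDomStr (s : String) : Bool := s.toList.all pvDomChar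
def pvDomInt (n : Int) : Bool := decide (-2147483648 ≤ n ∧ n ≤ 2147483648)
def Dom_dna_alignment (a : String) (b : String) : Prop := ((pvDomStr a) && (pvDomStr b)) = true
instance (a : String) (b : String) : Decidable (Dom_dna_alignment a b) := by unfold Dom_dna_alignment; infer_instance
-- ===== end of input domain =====

-- B replaces A's row-by-row in-place fill of a 2D table (and its unused min_index bookkeeping) by an
-- anti-diagonal wavefront: each anti-diagonal is a fresh list built from the two previous diagonals,
-- and the returned table is assembled from the diagonals at the end (alternative decomposition).

-- ===== PORT A =====
-- table[i][j] = v  (i, j are the Python indices; in A they are always in range)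
def pvSet2 {α : Type} (t : List (List α)) (i j : Int) (v : α) : List (List α) :=
  t.set i.toNat ((t.getD i.toNat []).set j.toNat v)

-- table[i][j]  (always in range in A)
def pvGet2 (t : List (List Int)) (i j : Int) : Int :=
  (t.getD i.toNat []).getD j.toNat 0

-- Python's lexicographic '<' on the 3-tuples (cost, (i, j))
def pvLtTup (x y : Int × Int × Int) : Bool :=
  x.1 < y.1 || (x.1 == y.1 && (x.2.1 < y.2.1 || (x.2.1 == y.2.1 && x.2.2 < y.2.2)))

-- one step of Python's min: keep the earlier element unless the later is strictly smaller
def pvMin2 (x y : Int × Int × Int) : Int × Int × Int :=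
  if pvLtTup y x then y else x

-- body of A's innermost loop (the Python loop body, verbatim)
def pvInnerBody (al bl : List Char) (i : Int)
    (st : (List (List Int)) × (List (List (Int × Int)))) (j : Int) :
    (List (List Int)) × (List (List (Int × Int))) :=
  let penalty : Int := if al.getD i.toNat ' ' ≠ bl.getD j.toNat ' ' then 1 else 0
  let options : List (Int × Int × Int) :=
    [(pvGet2 st.1 (i+1) (j+1) + penalty, (i+1, j+1)),
     (pvGet2 st.1 (i+1) j + 2, (i+1, j)),
     (pvGet2 st.1 i (j+1) + 2, (i, j+1))]
  let best := (options.drop 1).foldl pvMin2 (options.headD (0, 0, 0))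
  (pvSet2 st.1 i j best.1, pvSet2 st.2 i j best.2)

def dna_alignment (a : String) (b : String) : List (List Int) :=
  let al := a.toList
  let bl := b.toList
  let m := al.length
  let n := bl.length
  let table : List (List Int) := List.replicate (m+1) (List.replicate (n+1) 0)
  let minIndex : List (List (Int × Int)) := List.replicate (m+1) (List.replicate (n+1) ((0:Int), (0:Int)))
  let table := (PySem.List.pyRange (m : Int) (-1) (-1)).foldl
    (fun t i => pvSet2 t i (n : Int) (((m : Int) - i) * 2)) table
  let table := (PySem.List.pyRange (n : Int) (-1) (-1)).foldl
    (fun t j => pvSet2 t (m : Int) j (((n : Int) - j) * 2)) table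
  let st := (PySem.List.pyRange ((m : Int) - 1) (-1) (-1)).foldl
    (fun st i => (PySem.List.pyRange ((n : Int) - 1) (-1) (-1)).foldl
      (pvInnerBody al bl i) st) (table, minIndex)
  st.1

-- ===== PORT B =====
-- Source B's inner loop: the anti-diagonal i + j = s, built left to right from the two previous
-- diagonals d1 (= diags[s+1]) and d2 (= diags[s+2]).  Python's max(0, s - n) is Nat subtraction
-- s - n here (exact: Nat subtraction truncates at 0).
def pvDiagRow (al bl : List Char) (m n s : Nat) (d1 d2 : List Int) : List Int :=
  let lo := s - n
  let hi := min m s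
  (List.range' lo (hi + 1 - lo)).foldl (fun cur i =>
    let j := s - i
    cur ++ [
      if i = m then 2 * ((n : Int) - (j : Int))
      else if j = n then 2 * ((m : Int) - (i : Int))
      else
        let lo1 := s + 1 - n
        let lo2 := s + 2 - n
        let diag := d2.getD (i + 1 - lo2) 0 + (if al.getD i ' ' ≠ bl.getD j ' ' then (1:Int) else 0)
        let down := d1.getD (i + 1 - lo1) 0 + 2
        let right := d1.getD (i - lo1) 0 + 2
        min (min diag down) right]) []

-- Source B's outer loop: 'for s in range(m+n-1, -1, -1)', fuel k = diagonals built so far;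
-- the result lists diagonals s = m+n-k, …, m+n (Python's diags[s] assignment at descending s).
def pvDiagsB (al bl : List Char) (m n : Nat) : Nat → List (List Int)
  | 0 => [[0]]
  | k+1 =>
    let ds := pvDiagsB al bl m n k
    pvDiagRow al bl m n (m + n - (k+1)) (ds.getD 0 []) (ds.getD 1 []) :: ds

def dna_alignment_alt (a : String) (b : String) : List (List Int) :=
  let al := a.toList
  let bl := b.toList
  let m := al.length
  let n := bl.length
  let diags := pvDiagsB al bl m n (m + n)
  (List.range (m+1)).map (fun i => (List.range (n+1)).map (fun j =>
    (diags.getD (i + j) []).getD (i - (i + j - n)) 0))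

-- ===== PRECONDITION & SPEC =====
def Spec_dna_alignment (a : String) (b : String) (out : List (List Int)) : Prop := out = dna_alignment_alt a b
instance (a : String) (b : String) (out : List (List Int)) : Decidable (Spec_dna_alignment a b out) := by unfold Spec_dna_alignment; infer_instance

-- ===== CLAIM (what is proved, stated in full; the proofs are below) =====
def Claim_equal_dna_alignment : Prop := ∀ (a : String) (b : String), Dom_dna_alignment a b → Spec_dna_alignment a b (dna_alignment a b)

-- ===== LEMMAS AND PROOFS =====

-- the suffix-alignment cost both programs compute: cost of aligning a[i:] with b[j:]
def pvC (al bl : List Char) (i j : Nat) : Int :=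
  if _hi : i < al.length then
    if _hj : j < bl.length then
      min (min (pvC al bl (i+1) (j+1) + (if al.getD i ' ' ≠ bl.getD j ' ' then (1:Int) else 0))
               (pvC al bl (i+1) j + 2))
          (pvC al bl i (j+1) + 2)
    else 2 * ((al.length : Int) - (i : Int))
  else 2 * ((bl.length : Int) - (j : Int))
termination_by (al.length - i) + (bl.length - j)
decreasing_by all_goals omega

def pvCRow (al bl : List Char) (i : Nat) : List Int :=
  (List.range (bl.length + 1)).map (fun j => pvC al bl i j)

-- the anti-diagonal i + j = s of the pvC matrix, by increasing i
def pvDiagSpec (al bl : List Char) (s : Nat) : List Int :=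
  (List.range' (s - bl.length) (min al.length s + 1 - (s - bl.length))).map
    (fun i => pvC al bl i (s - i))

-- reverse row builder (A's inner loop as a list-building recursion; proof-side only)
def pvRowB (al bl : List Char) (i : Nat) (below : List Int) : Nat → List Int → List Int
  | 0, rev => rev
  | j+1, rev =>
    pvRowB al bl i below j
      (rev ++ [min (min (below.getD (j+1) 0 + (if al.getD i ' ' ≠ bl.getD j ' ' then (1:Int) else 0))
                        (below.getD j 0 + 2))
                   (rev.getLastD 0 + 2)])

-- the row A's first init loop leaves at index i
def pvInitRow (m n i : Nat) : List Int :=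
  (List.replicate (n+1) (0:Int)).set n (((m : Int) - (i : Int)) * 2)

-- rows (m-d), …, m of the final answer, head first
def pvRowsUpTo (al bl : List Char) (m n : Nat) : Nat → List (List Int)
  | 0 => [(List.range (n+1)).map (fun j : Nat => 2 * ((n : Int) - (j : Int)))]
  | d+1 =>
    (pvRowB al bl (m-(d+1)) ((pvRowsUpTo al bl m n d).headD []) n
      [2 * ((m : Int) - ((m-(d+1) : Nat) : Int))]).reverse :: pvRowsUpTo al bl m n d

theorem pv_getD_set_self {α : Type} (l : List α) (i : Nat) (a d : α) (h : i < l.length) :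
    (l.set i a).getD i d = a := by
  simp [List.getD_eq_getElem?_getD, h]

theorem pv_getD_set_ne {α : Type} (l : List α) (i j : Nat) (a d : α) (h : i ≠ j) :
    (l.set i a).getD j d = l.getD j d := by
  simp [List.getD_eq_getElem?_getD, List.getElem?_set_ne h]

theorem pv_set_getD_self {α : Type} (l : List α) (i : Nat) (d : α) (h : i < l.length) :
    l.set i (l.getD i d) = l := by
  simp [List.getD_eq_getElem?_getD, List.getElem?_eq_getElem h, List.set_getElem_self]

theorem pv_drop_set_self {α : Type} (l : List α) (i : Nat) (a : α) (h : i < l.length) :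
    (l.set i a).drop i = a :: l.drop (i+1) := by
  have h' : i < (l.set i a).length := by simpa using h
  rw [List.drop_eq_getElem_cons h']
  rw [List.getElem_set_self h', List.drop_set_of_lt (by omega : i < i + 1)]

theorem pv_getD_zero_headD {α : Type} (l : List α) (d : α) : l.getD 0 d = l.headD d := by
  cases l <;> simp

theorem pv_getLastD_reverse_headD {α : Type} (l : List α) (d : α) :
    l.getLastD d = l.reverse.headD d := by
  simp [List.getLastD_eq_getLast?, List.head?_reverse]

theorem pv_getD_append_lt {α : Type} (l1 l2 : List α) (k : Nat) (d : α) (h : k < l1.length) :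
    (l1 ++ l2).getD k d = l1.getD k d := by
  simp [List.getD_eq_getElem?_getD, List.getElem?_append, h]

theorem pv_getD_map_range (N k : Nat) (f : Nat → List Int) (d : List Int) (h : k < N) :
    ((List.range N).map f).getD k d = f k := by
  simp [List.getD_eq_getElem?_getD, h]

theorem pv_getD_map_range' {α : Type} [Inhabited α] (L C t : Nat) (f : Nat → α) (d : α) (h : t < C) :
    ((List.range' L C).map f).getD t d = f (L + t) := by
  simp [List.getD_eq_getElem?_getD, h, List.getElem_range']

theorem pv_getD_map_range_int (N k : Nat) (f : Nat → Int) (d : Int) (h : k < N) :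
    ((List.range N).map f).getD k d = f k := by
  simp [List.getD_eq_getElem?_getD, h]

theorem pv_set_append_mid {α : Type} (l1 : List α) (a : α) (l2 : List α) (x : α)
    (k : Nat) (hk : k = l1.length) : (l1 ++ a :: l2).set k x = l1 ++ x :: l2 := by
  subst hk
  rw [List.set_append_right _ _ (Nat.le_refl _)]
  simp

theorem pvMin2_fst (x y : Int × Int × Int) : (pvMin2 x y).1 = min x.1 y.1 := by
  simp only [pvMin2, pvLtTup]
  split_ifs with h
  · simp_all
    omega
  · rw [min_def]
    simp_all


theorem pvRowsUpTo_length (al bl : List Char) (m n d : Nat) :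
    (pvRowsUpTo al bl m n d).length = d + 1 := by
  induction d with
  | zero => simp [pvRowsUpTo]
  | succ d ih => simp [pvRowsUpTo, ih]

-- A's inner j-loop, given that row i+1 already holds `below` and row i is r with rev.reverse = r.drop J
theorem pv_innerA (al bl : List Char) (_m n i : Nat) (below : List Int) :
    ∀ (J : Nat) (st : (List (List Int)) × (List (List (Int × Int)))) (r rev : List Int),
    J ≤ n → i < st.1.length → st.1.getD (i+1) [] = below → st.1.getD i [] = r →
    r.length = n + 1 → rev.reverse = r.drop J →
    ((PySem.List.pyRange ((J : Int) - 1) (-1) (-1)).foldl (pvInnerBody al bl (i : Int)) st).1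
    = st.1.set i (pvRowB al bl i below J rev).reverse := by
  intro J
  induction J with
  | zero =>
    intro st r rev hJ hi hb hr hlen hrev
    rw [show ((0:Nat):Int) - 1 = (-1:Int) by simp,
        PySem.List.pyRange_neg_one_eq_nil (le_refl _)]
    simp only [List.foldl_nil, pvRowB]
    rw [hrev, List.drop_zero, ← hr, pv_set_getD_self _ _ _ hi]
  | succ J ih =>
    intro st r rev hJ hi hb hr hlen hrev
    rw [show (((J+1:Nat)):Int) - 1 = ((J:Nat):Int) by push_cast; ring,
        PySem.List.pyRange_neg_one_cons (show (-1:Int) < ((J:Nat):Int) by omega)]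
    rw [List.foldl_cons]
    have hJn : J < n := by omega
    have hJr : J < r.length := by omega
    have hJr1 : J + 1 < r.length := by omega
    have hgetJ1 : r.getD (J+1) 0 = rev.getLastD 0 := by
      rw [pv_getLastD_reverse_headD, hrev, ← pv_getD_zero_headD,
          List.getD_eq_getElem?_getD, List.getD_eq_getElem?_getD, List.getElem?_drop]
    have h1 : (pvInnerBody al bl (i : Int) st ((J:Nat):Int)).1 = st.1.set i (r.set J
            (min (min (below.getD (J+1) 0 + (if al.getD i ' ' ≠ bl.getD J ' ' then (1:Int) else 0))
                      (below.getD J 0 + 2))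
                 (rev.getLastD 0 + 2))) := by
      simp only [pvInnerBody, pvGet2, pvSet2, pvMin2_fst, List.drop, List.foldl, List.headD]
      have e1 : ((i:Int) + 1).toNat = i + 1 := by omega
      have e2 : (((J:Nat):Int) + 1).toNat = J + 1 := by omega
      have e3 : ((i:Int)).toNat = i := by omega
      have e4 : (((J:Nat):Int)).toNat = J := by omega
      rw [e1, e2, e3, e4, hb, hr, hgetJ1]
    rw [ih (pvInnerBody al bl (i : Int) st ((J:Nat):Int)) (r.set J _) (rev ++ [_]) (by omega)
          (by rw [h1]; simpa using hi)
          (by rw [h1, pv_getD_set_ne _ _ _ _ _ (by omega : i ≠ i + 1)]; exact hb)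
          (by rw [h1]; exact pv_getD_set_self _ _ _ _ hi)
          (by simpa using hlen)
          (by rw [List.reverse_append, List.reverse_singleton, List.singleton_append,
                  pv_drop_set_self _ _ _ hJr, hrev])]
    rw [h1, List.set_set]
    congr 2

-- A's first init loop
theorem pv_loop1 (m n : Nat) :
    ∀ (I : Nat) (t : List (List Int)), I < t.length →
    (∀ k, k ≤ I → t.getD k [] = List.replicate (n+1) 0) →
    (PySem.List.pyRange (I : Int) (-1) (-1)).foldl
      (fun t i => pvSet2 t i (n : Int) (((m : Int) - i) * 2)) t
    = (List.range (I+1)).map (fun k => pvInitRow m n k) ++ t.drop (I+1) := by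
  intro I
  induction I with
  | zero =>
    intro t ht h0
    rw [PySem.List.pyRange_neg_one_cons (show (-1:Int) < ((0:Nat):Int) by omega)]
    rw [show ((0:Nat):Int) - 1 = (-1:Int) by simp,
        PySem.List.pyRange_neg_one_eq_nil (le_refl _)]
    rw [List.foldl_cons, List.foldl_nil]
    have e : pvSet2 t ((0:Nat):Int) (n : Int) (((m : Int) - ((0:Nat):Int)) * 2)
        = t.set 0 (pvInitRow m n 0) := by
      simp only [pvSet2, Int.toNat_natCast, h0 0 (le_refl _), pvInitRow]
    rw [e]
    cases t with
    | nil => simp at ht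
    | cons x ts => simp [List.range_succ]
  | succ I ih =>
    intro t ht h0
    rw [PySem.List.pyRange_neg_one_cons (show (-1:Int) < (((I+1:Nat)):Int) by omega)]
    rw [show (((I+1:Nat)):Int) - 1 = ((I:Nat):Int) by push_cast; ring]
    rw [List.foldl_cons]
    have e : pvSet2 t (((I+1:Nat)):Int) (n : Int) (((m : Int) - (((I+1:Nat)):Int)) * 2)
        = t.set (I+1) (pvInitRow m n (I+1)) := by
      simp only [pvSet2, Int.toNat_natCast, h0 (I+1) (le_refl _), pvInitRow]
    rw [e]
    rw [ih (t.set (I+1) (pvInitRow m n (I+1)))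
          (by simp; omega)
          (fun k hk => by
            rw [pv_getD_set_ne _ _ _ _ _ (by omega : I + 1 ≠ k)]
            exact h0 k (by omega))]
    rw [pv_drop_set_self _ _ _ (by omega : I + 1 < t.length)]
    rw [show List.range (I+1+1) = List.range (I+1) ++ [I+1] from List.range_succ]
    simp

-- commute A's second loop to an operation on row m alone
theorem pv_fold_row (m n : Nat) :
    ∀ (js : List Int) (t : List (List Int)), m < t.length →
    js.foldl (fun t j => pvSet2 t (m : Int) j (((n : Int) - j) * 2)) t
    = t.set m (js.foldl (fun r j => r.set j.toNat (((n : Int) - j) * 2)) (t.getD m [])) := by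
  intro js
  induction js with
  | nil => intro t hm; simp only [List.foldl_nil]; rw [pv_set_getD_self _ _ _ hm]
  | cons j js ih =>
    intro t hm
    simp only [List.foldl_cons]
    rw [ih (pvSet2 t (m : Int) j (((n : Int) - j) * 2)) (by simp [pvSet2]; omega)]
    simp only [pvSet2, Int.toNat_natCast]
    rw [pv_getD_set_self _ _ _ _ (by simpa using hm), List.set_set]

-- the descending per-row assignment loop of A's second init loop
theorem pv_loop2_row (n : Nat) :
    ∀ (J : Nat) (r : List Int), J < r.length →
    (PySem.List.pyRange (J : Int) (-1) (-1)).foldl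
      (fun r j => r.set j.toNat (((n : Int) - j) * 2)) r
    = (List.range (J+1)).map (fun j : Nat => ((n : Int) - (j : Int)) * 2) ++ r.drop (J+1) := by
  intro J
  induction J with
  | zero =>
    intro r hr
    rw [PySem.List.pyRange_neg_one_cons (show (-1:Int) < ((0:Nat):Int) by omega)]
    rw [show ((0:Nat):Int) - 1 = (-1:Int) by simp,
        PySem.List.pyRange_neg_one_eq_nil (le_refl _)]
    rw [List.foldl_cons, List.foldl_nil]
    cases r with
    | nil => simp at hr
    | cons x rs => simp [List.range_succ]
  | succ J ih =>
    intro r hr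
    rw [PySem.List.pyRange_neg_one_cons (show (-1:Int) < (((J+1:Nat)):Int) by omega)]
    rw [show (((J+1:Nat)):Int) - 1 = ((J:Nat):Int) by push_cast; ring]
    rw [List.foldl_cons]
    rw [ih (r.set (((J+1:Nat)):Int).toNat (((n : Int) - (((J+1:Nat)):Int)) * 2)) (by simp; omega)]
    simp only [Int.toNat_natCast]
    rw [pv_drop_set_self _ _ _ (by omega : J + 1 < r.length)]
    simp [List.range_succ]

-- A's second init loop, reduced to row m
theorem pv_loop2 (m n : Nat) (t : List (List Int)) (hm : m < t.length)
    (hr : (t.getD m []).length = n + 1) :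
    (PySem.List.pyRange (n : Int) (-1) (-1)).foldl
      (fun t j => pvSet2 t (m : Int) j (((n : Int) - j) * 2)) t
    = t.set m ((List.range (n+1)).map (fun j : Nat => ((n : Int) - (j : Int)) * 2)) := by
  rw [pv_fold_row m n _ t hm, pv_loop2_row n n (t.getD m []) (by omega)]
  rw [show (t.getD m []).drop (n+1) = [] from List.drop_of_length_le (by omega)]
  simp

-- A's main loop
theorem pv_outerA (al bl : List Char) (m n : Nat) :
    ∀ (I : Nat) (st : (List (List Int)) × (List (List (Int × Int)))), I ≤ m →
    st.1 = (List.range I).map (pvInitRow m n) ++ pvRowsUpTo al bl m n (m - I) →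
    ((PySem.List.pyRange ((I : Int) - 1) (-1) (-1)).foldl
      (fun st i => (PySem.List.pyRange ((n : Int) - 1) (-1) (-1)).foldl
        (pvInnerBody al bl i) st) st).1
    = pvRowsUpTo al bl m n m := by
  intro I
  induction I with
  | zero =>
    intro st hI hst
    rw [show ((0:Nat):Int) - 1 = (-1:Int) by simp,
        PySem.List.pyRange_neg_one_eq_nil (le_refl _)]
    simpa using hst
  | succ I ih =>
    intro st hI hst
    rw [show (((I+1:Nat)):Int) - 1 = ((I:Nat):Int) by push_cast; ring,
        PySem.List.pyRange_neg_one_cons (show (-1:Int) < ((I:Nat):Int) by omega)]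
    rw [List.foldl_cons]
    have hmI : m - (I+1) + 1 = m - I := by omega
    have hlenpre : ((List.range (I+1)).map (pvInitRow m n)).length = I + 1 := by simp
    have hlen1 : st.1.length = m + 1 := by
      rw [hst]; simp [pvRowsUpTo_length]; omega
    have hgetI : st.1.getD I [] = pvInitRow m n I := by
      rw [hst, pv_getD_append_lt _ _ _ _ (by simp),
          pv_getD_map_range _ _ _ _ (by omega)]
    have hgetI1 : st.1.getD (I+1) [] = (pvRowsUpTo al bl m n (m - (I+1))).headD [] := by
      rw [hst, List.getD_eq_getElem?_getD, List.getElem?_append, if_neg (by simp)]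
      simp [← List.getD_eq_getElem?_getD, pv_getD_zero_headD]
    have hrowlen : (pvInitRow m n I).length = n + 1 := by simp [pvInitRow]
    have hrev : ([2 * ((m : Int) - (I : Int))] : List Int).reverse
        = (pvInitRow m n I).drop n := by
      simp only [pvInitRow, List.reverse_singleton]
      rw [pv_drop_set_self _ _ _ (by simp : n < (List.replicate (n+1) (0:Int)).length)]
      rw [show (List.replicate (n+1) (0:Int)).drop (n+1) = [] from
            List.drop_of_length_le (by simp)]
      congr 1
      ring
    apply ih (List.foldl (pvInnerBody al bl ((I:Nat):Int)) st
        (PySem.List.pyRange ((n : Int) - 1) (-1) (-1))) (by omega)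
    rw [pv_innerA al bl m n I ((pvRowsUpTo al bl m n (m - (I+1))).headD []) n st
          (pvInitRow m n I) [2 * ((m : Int) - (I : Int))]
          (le_refl _) (by omega) hgetI1 hgetI hrowlen hrev]
    rw [hst]
    rw [show List.range (I+1) = List.range I ++ [I] from List.range_succ,
        List.map_append, List.append_assoc, List.map_singleton, List.singleton_append]
    rw [pv_set_append_mid _ _ _ _ I (by simp)]
    have hmk : m - I = (m - (I+1)) + 1 := by omega
    have hidx : m - ((m - (I+1)) + 1) = I := by omega
    rw [hmk, pvRowsUpTo, hidx]

-- pvC at the boundaries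
theorem pvC_base_row (al bl : List Char) (j : Nat) :
    pvC al bl al.length j = 2 * ((bl.length : Int) - (j : Nat)) := by
  rw [pvC]; simp

theorem pvC_base_col (al bl : List Char) (i : Nat) (h : i < al.length) :
    pvC al bl i bl.length = 2 * ((al.length : Int) - (i : Nat)) := by
  rw [pvC]; simp [h]

theorem pvC_step (al bl : List Char) (i j : Nat) (hi : i < al.length) (hj : j < bl.length) :
    pvC al bl i j =
      min (min (pvC al bl (i+1) (j+1) + (if al.getD i ' ' ≠ bl.getD j ' ' then (1:Int) else 0))
               (pvC al bl (i+1) j + 2))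
          (pvC al bl i (j+1) + 2) := by
  rw [pvC]; simp [hi, hj]

-- A's reverse row builder reaches the pvC row (given the pvC row below)
theorem pv_rowB_c (al bl : List Char) (i : Nat) (hi : i < al.length) :
    ∀ (J : Nat), J ≤ bl.length →
    pvRowB al bl i (pvCRow al bl (i+1)) J
      (((List.range' J (bl.length + 1 - J)).map (fun j => pvC al bl i j)).reverse)
    = ((List.range (bl.length + 1)).map (fun j => pvC al bl i j)).reverse := by
  intro J
  induction J with
  | zero =>
    intro _
    rw [pvRowB]
    rw [show List.range' 0 (bl.length + 1 - 0) = List.range (bl.length + 1) by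
          simp [List.range_eq_range']]
  | succ J ih =>
    intro hJ
    have hJn : J < bl.length := by omega
    rw [pvRowB]
    have hsplit : List.range' J (bl.length + 1 - J) = J :: List.range' (J+1) (bl.length - J) := by
      rw [show bl.length + 1 - J = (bl.length - J) + 1 by omega, List.range'_succ]
    have hlast : ((((List.range' (J+1) (bl.length + 1 - (J+1))).map
          (fun j => pvC al bl i j)).reverse) : List Int).getLastD 0 = pvC al bl i (J+1) := by
      rw [pv_getLastD_reverse_headD, List.reverse_reverse, ← pv_getD_zero_headD,
          pv_getD_map_range' _ _ _ _ _ (by omega)]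
    have hb1 : (pvCRow al bl (i+1)).getD (J+1) 0 = pvC al bl (i+1) (J+1) := by
      rw [pvCRow, pv_getD_map_range_int _ _ _ _ (by omega)]
    have hb0 : (pvCRow al bl (i+1)).getD J 0 = pvC al bl (i+1) J := by
      rw [pvCRow, pv_getD_map_range_int _ _ _ _ (by omega)]
    rw [hlast, hb1, hb0]
    have he : min (min (pvC al bl (i+1) (J+1) + (if al.getD i ' ' ≠ bl.getD J ' ' then (1:Int) else 0))
                       (pvC al bl (i+1) J + 2))
                  (pvC al bl i (J+1) + 2) = pvC al bl i J := (pvC_step al bl i J hi hJn).symm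
    rw [he]
    have hrev : (((List.range' (J+1) (bl.length + 1 - (J+1))).map (fun j => pvC al bl i j)).reverse : List Int)
          ++ [pvC al bl i J]
        = ((List.range' J (bl.length + 1 - J)).map (fun j => pvC al bl i j)).reverse := by
      rw [hsplit]
      simp [show bl.length + 1 - (J+1) = bl.length - J by omega]
    rw [hrev]
    exact ih (by omega)

-- the rows of A's final table are the pvC rows
theorem pv_rowsUpTo_c (al bl : List Char) :
    ∀ (d : Nat), d ≤ al.length →
    pvRowsUpTo al bl al.length bl.length d
    = (List.range' (al.length - d) (d + 1)).map (fun i => pvCRow al bl i) := by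
  intro d
  induction d with
  | zero =>
    intro _
    rw [pvRowsUpTo]
    rw [show List.range' (al.length - 0) 1 = [al.length] by simp]
    simp only [List.map_singleton, pvCRow]
    congr 1
    exact List.map_congr_left (fun j _ => (pvC_base_row al bl j).symm)
  | succ d ih =>
    intro hd
    have hi : al.length - (d+1) < al.length := by omega
    have hstep : al.length - (d+1) + 1 = al.length - d := by omega
    rw [pvRowsUpTo, ih (by omega)]
    have hhead : ((List.range' (al.length - d) (d + 1)).map (fun i => pvCRow al bl i)).headD []
        = pvCRow al bl (al.length - d) := by
      rw [List.range'_succ]; simp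
    rw [hhead]
    have hstart : ([2 * ((al.length : Int) - ((al.length - (d+1) : Nat) : Int))] : List Int)
        = ((List.range' bl.length (bl.length + 1 - bl.length)).map
            (fun j => pvC al bl (al.length - (d+1)) j)).reverse := by
      rw [show bl.length + 1 - bl.length = 1 by omega]
      simp [pvC_base_col al bl _ hi]
    rw [hstart, ← hstep]
    rw [pv_rowB_c al bl (al.length - (d+1)) hi bl.length (le_refl _)]
    rw [List.reverse_reverse]
    rw [show List.range' (al.length - (d+1)) (d + 1 + 1)
          = (al.length - (d+1)) :: List.range' (al.length - (d+1) + 1) (d+1) by rw [List.range'_succ]]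
    rw [hstep, List.map_cons]
    rfl

-- B's diagonal builder: one diagonal is correct given the two above it
theorem pv_diagRow_c (al bl : List Char) (s : Nat) (hs : s < al.length + bl.length) :
    pvDiagRow al bl al.length bl.length s (pvDiagSpec al bl (s+1)) (pvDiagSpec al bl (s+2))
    = pvDiagSpec al bl s := by
  rw [pvDiagRow]
  conv_rhs => rw [pvDiagSpec]
  have hfold : ∀ (l : List Nat) (acc : List Int) (f : Nat → Int),
      l.foldl (fun cur i => cur ++ [f i]) acc = acc ++ l.map f := by
    intro l
    induction l with
    | nil => intro acc f; simp
    | cons x xs ih => intro acc f; simp [ih]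
  rw [hfold]
  rw [List.nil_append]
  apply List.map_congr_left
  intro i hmem
  rw [List.mem_range'_1] at hmem
  obtain ⟨hlo, hhi⟩ := hmem
  dsimp only
  have hin : s - bl.length ≤ i ∧ i ≤ min al.length s := ⟨hlo, by omega⟩
  have hjle : s - i ≤ bl.length := by omega
  have his : i ≤ s := by omega
  by_cases him : i = al.length
  · subst him
    simp [pvC_base_row]
  · have hilt : i < al.length := by omega
    rw [if_neg him]
    by_cases hjn : s - i = bl.length
    · rw [if_pos hjn, hjn, pvC_base_col al bl i hilt]
    · have hjlt : s - i < bl.length := by omega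
      rw [if_neg hjn]
      have hg2 : (pvDiagSpec al bl (s+2)).getD (i + 1 - (s + 2 - bl.length)) 0
          = pvC al bl (i+1) (s - i + 1) := by
        have ht : i + 1 - (s + 2 - bl.length)
            < min al.length (s + 2) + 1 - (s + 2 - bl.length) := by omega
        have hX : s + 2 - bl.length + (i + 1 - (s + 2 - bl.length)) = i + 1 := by omega
        rw [pvDiagSpec, pv_getD_map_range' _ _ _ _ _ ht]
        simp only [hX]
        congr 1
        omega
      have hg1a : (pvDiagSpec al bl (s+1)).getD (i + 1 - (s + 1 - bl.length)) 0
          = pvC al bl (i+1) (s - i) := by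
        have ht : i + 1 - (s + 1 - bl.length)
            < min al.length (s + 1) + 1 - (s + 1 - bl.length) := by omega
        have hX : s + 1 - bl.length + (i + 1 - (s + 1 - bl.length)) = i + 1 := by omega
        rw [pvDiagSpec, pv_getD_map_range' _ _ _ _ _ ht]
        simp only [hX]
        congr 1
        omega
      have hg1b : (pvDiagSpec al bl (s+1)).getD (i - (s + 1 - bl.length)) 0
          = pvC al bl i (s - i + 1) := by
        have ht : i - (s + 1 - bl.length)
            < min al.length (s + 1) + 1 - (s + 1 - bl.length) := by omega
        have hX : s + 1 - bl.length + (i - (s + 1 - bl.length)) = i := by omega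
        rw [pvDiagSpec, pv_getD_map_range' _ _ _ _ _ ht]
        simp only [hX]
        congr 1
        omega
      rw [hg2, hg1a, hg1b]
      exact (pvC_step al bl i (s - i) hilt hjlt).symm

-- B's outer loop builds exactly the diagonals of the pvC matrix
theorem pv_diagsB_c (al bl : List Char) :
    ∀ (k : Nat), k ≤ al.length + bl.length →
    pvDiagsB al bl al.length bl.length k
    = (List.range' (al.length + bl.length - k) (k + 1)).map (fun s => pvDiagSpec al bl s) := by
  intro k
  induction k with
  | zero =>
    intro _
    rw [pvDiagsB]
    rw [show List.range' (al.length + bl.length - 0) 1 = [al.length + bl.length] by simp]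
    rw [List.map_singleton, pvDiagSpec]
    rw [show al.length + bl.length - bl.length = al.length by omega,
        show min al.length (al.length + bl.length) = al.length by omega,
        show al.length + 1 - al.length = 1 by omega]
    rw [show List.range' al.length 1 = [al.length] by simp]
    rw [List.map_singleton]
    rw [show al.length + bl.length - al.length = bl.length by omega, pvC_base_row]
    norm_num
  | succ k ih =>
    intro hk
    have hs : al.length + bl.length - (k+1) < al.length + bl.length := by omega
    rw [pvDiagsB, ih (by omega)]
    have h0 : ((List.range' (al.length + bl.length - k) (k + 1)).map
          (fun s => pvDiagSpec al bl s)).getD 0 []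
        = pvDiagSpec al bl (al.length + bl.length - (k+1) + 1) := by
      rw [pv_getD_map_range' _ _ _ _ _ (by omega)]
      congr 1; omega
    have h1 : ((List.range' (al.length + bl.length - k) (k + 1)).map
          (fun s => pvDiagSpec al bl s)).getD 1 []
        = pvDiagSpec al bl (al.length + bl.length - (k+1) + 2) := by
      by_cases hk1 : 1 ≤ k
      · rw [pv_getD_map_range' _ _ _ _ _ (by omega)]
        congr 1; omega
      · -- k = 0: index 1 is out of range, getD gives []; and the s+2 diagonal spec is empty too
        have hk0 : k = 0 := by omega
        subst hk0
        rw [List.getD_eq_getElem?_getD,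
            List.getElem?_eq_none (by simp)]
        rw [pvDiagSpec]
        rw [show al.length + bl.length - 1 + 2 = al.length + bl.length + 1 by omega]
        rw [show min al.length (al.length + bl.length + 1) + 1 -
              (al.length + bl.length + 1 - bl.length) = 0 by omega]
        simp
    rw [h0, h1, pv_diagRow_c al bl _ hs]
    rw [show List.range' (al.length + bl.length - (k+1)) (k + 1 + 1)
          = (al.length + bl.length - (k+1))
            :: List.range' (al.length + bl.length - (k+1) + 1) (k+1) by rw [List.range'_succ]]
    rw [List.map_cons]
    rw [show al.length + bl.length - (k+1) + 1 = al.length + bl.length - k by omega]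

-- ===== VERDICT (by name: the statement is the Claim_ definition above) =====
theorem dna_alignment_spec : Claim_equal_dna_alignment := by
  intro a b _
  unfold Spec_dna_alignment dna_alignment dna_alignment_alt
  dsimp only
  generalize a.toList = al
  generalize b.toList = bl
  rw [pv_loop1 al.length bl.length al.length
        (List.replicate (al.length+1) (List.replicate (bl.length+1) 0))
        (by simp)
        (fun k hk => by
          rw [List.getD_eq_getElem?_getD]
          simp [Nat.lt_succ_of_le hk])]
  rw [show (List.replicate (al.length+1) (List.replicate (bl.length+1) (0:Int))).drop (al.length+1)
        = [] from by simp, List.append_nil]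
  rw [pv_loop2 al.length bl.length _
        (by simp)
        (by rw [pv_getD_map_range _ _ _ _ (by omega)]; simp [pvInitRow])]
  have h3 : ((List.range (al.length+1)).map (fun k => pvInitRow al.length bl.length k)).set
        al.length ((List.range (bl.length+1)).map (fun j : Nat => ((bl.length : Int) - (j : Int)) * 2))
      = (List.range al.length).map (pvInitRow al.length bl.length)
        ++ pvRowsUpTo al bl al.length bl.length 0 := by
    rw [show List.range (al.length+1) = List.range al.length ++ [al.length] from List.range_succ,
        List.map_append, List.map_singleton]
    rw [pv_set_append_mid _ _ _ _ al.length (by simp)]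
    congr 1
    rw [pvRowsUpTo]
    congr 1
    exact List.map_congr_left (fun j _ => by ring)
  rw [h3]
  rw [pv_outerA al bl al.length bl.length al.length _ (le_refl _)
        (by simp)]
  rw [pv_rowsUpTo_c al bl al.length (le_refl _)]
  rw [pv_diagsB_c al bl (al.length + bl.length) (le_refl _)]
  rw [show al.length + bl.length - (al.length + bl.length) = 0 by omega]
  rw [show al.length - al.length = 0 by omega]
  rw [show List.range' 0 (al.length + 1) = List.range (al.length + 1) by
        simp [List.range_eq_range']]
  apply List.map_congr_left
  intro i hi
  rw [List.mem_range] at hi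
  rw [pvCRow]
  apply List.map_congr_left
  intro j hj
  rw [List.mem_range] at hj
  rw [pv_getD_map_range' 0 (al.length + bl.length + 1) (i+j) _ _ (by omega)]
  rw [Nat.zero_add]
  rw [pvDiagSpec, pv_getD_map_range' _ _ _ _ _ (by omega)]
  have hX : i + j - bl.length + (i - (i + j - bl.length)) = i := by omega
  simp only [hX]
  congr 1
  omega
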